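-- pv_equiv track=rewrite | github.com/Rainbow0625/Rule-learning | rule_search_and_learn_weights_2.py | get_fact_dic_sample
-- ===== SOURCE A (Python) =====
-- def get_fact_dic_sample(facts_sample, isUncertian=False):
--     # Only save once for the reverse pre.e.g. 0, 2, 4....
--     fact_dic = {}
--     for f in facts_sample:
--         if f[2] % 2 == 0:
--             if f[2] in fact_dic.keys():
--                 templist = fact_dic.get(f[2])
--             else:
--                 templist = []
--             templist.append([f[0], f[1]])
--             fact_dic[f[2]] = templist
--     return fact_dic
-- ===== SOURCE B (Python) =====
-- def get_fact_dic_sample(facts_sample, isUncertian=False):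
--     # Two-pass: collect even-relation facts, list their distinct keys in first-occurrence
--     # order, then build each group by a per-key scan (no accumulated dict of lists).
--     evens = [f for f in facts_sample if f[2] % 2 == 0]
--     keys = list(dict.fromkeys(f[2] for f in evens))
--     return {k: [[f[0], f[1]] for f in evens if f[2] == k] for k in keys}
-- ===== Notes on version B (the rewrite author's own statement) =====
-- stated objective: alternative
-- what changed: Replaces the one-pass dict-of-lists accumulation with a two-pass strategy: filter the even-relation facts, dedup their keys in first-occurrence order, then build each group by an independent per-key scan.
import Mathlib
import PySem

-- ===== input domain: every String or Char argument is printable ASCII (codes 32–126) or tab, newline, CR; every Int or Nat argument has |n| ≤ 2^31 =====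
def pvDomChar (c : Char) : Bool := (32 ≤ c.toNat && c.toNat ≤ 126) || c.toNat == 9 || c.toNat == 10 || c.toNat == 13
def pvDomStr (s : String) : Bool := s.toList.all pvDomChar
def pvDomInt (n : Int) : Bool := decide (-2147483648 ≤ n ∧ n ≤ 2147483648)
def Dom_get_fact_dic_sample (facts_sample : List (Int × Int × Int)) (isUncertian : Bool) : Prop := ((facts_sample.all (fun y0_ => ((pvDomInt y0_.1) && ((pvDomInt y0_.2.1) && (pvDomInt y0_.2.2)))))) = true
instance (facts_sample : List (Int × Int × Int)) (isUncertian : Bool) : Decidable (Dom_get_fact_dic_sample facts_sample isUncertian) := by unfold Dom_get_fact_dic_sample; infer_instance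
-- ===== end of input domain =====

-- B: same grouping of even-relation facts, rebuilt as filter + ordered key-dedup + per-key scans instead of A's one-pass dict-of-lists accumulation (alternative decomposition, same results).
-- ===== PORT A =====
def get_fact_dic_sample (facts_sample : List (Int × Int × Int)) (isUncertian : Bool) : List (Int × List (List Int)) :=
  (facts_sample.foldl (fun fact_dic f =>
      if PySem.Int.mod f.2.2 2 == 0 then
        let templist := if fact_dic.contains f.2.2 then fact_dic.getD f.2.2 [] else []
        fact_dic.insert f.2.2 (templist ++ [[f.1, f.2.1]])
      else fact_dic)
    (PySem.Dict.empty : PySem.Dict Int (List (List Int)))).items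

-- ===== PORT B =====
def get_fact_dic_sample_alt (facts_sample : List (Int × Int × Int)) (isUncertian : Bool) : List (Int × List (List Int)) :=
  let evens := facts_sample.filter (fun f => PySem.Int.mod f.2.2 2 == 0)
  let keys := PySem.List.dedup (evens.map (fun f => f.2.2))
  keys.map (fun k => (k, (evens.filter (fun f => f.2.2 == k)).map (fun f => [f.1, f.2.1])))

-- ===== PRECONDITION & SPEC =====
def Spec_get_fact_dic_sample (facts_sample : List (Int × Int × Int)) (isUncertian : Bool) (out : List (Int × List (List Int))) : Prop := out = get_fact_dic_sample_alt facts_sample isUncertian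
instance (facts_sample : List (Int × Int × Int)) (isUncertian : Bool) (out : List (Int × List (List Int))) : Decidable (Spec_get_fact_dic_sample facts_sample isUncertian out) := by unfold Spec_get_fact_dic_sample; infer_instance

-- ===== CLAIM (what is proved, stated in full; the proofs are below) =====
def Claim_equal_get_fact_dic_sample : Prop := ∀ (facts_sample : List (Int × Int × Int)) (isUncertian : Bool), Dom_get_fact_dic_sample facts_sample isUncertian → Spec_get_fact_dic_sample facts_sample isUncertian (get_fact_dic_sample facts_sample isUncertian)

-- ===== LEMMAS AND PROOFS =====

-- A's loop body 'get-or-[] then append then store' is one Dict.modify step.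
theorem step_eq (d : PySem.Dict Int (List (List Int))) (f : Int × Int × Int) :
    d.insert f.2.2 ((if d.contains f.2.2 then d.getD f.2.2 [] else []) ++ [[f.1, f.2.1]])
      = d.modify f.2.2 [] (· ++ [[f.1, f.2.1]]) := by
  cases h : d.contains f.2.2 with
  | false => show d.insert _ ([] ++ _) = _
             simp only [PySem.Dict.modify, PySem.Dict.getD_of_not_contains d ([] : List (List Int)) h, List.nil_append]
  | true => rfl

theorem ports_agree (facts_sample : List (Int × Int × Int)) (u : Bool) :
    get_fact_dic_sample facts_sample u = get_fact_dic_sample_alt facts_sample u := by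
  unfold get_fact_dic_sample get_fact_dic_sample_alt
  rw [show (fun (fact_dic : PySem.Dict Int (List (List Int))) (f : Int × Int × Int) =>
        if PySem.Int.mod f.2.2 2 == 0 then
          let templist := if fact_dic.contains f.2.2 then fact_dic.getD f.2.2 [] else []
          fact_dic.insert f.2.2 (templist ++ [[f.1, f.2.1]])
        else fact_dic)
      = (fun d f => if (fun (g : Int × Int × Int) => PySem.Int.mod g.2.2 2 == 0) f = true
          then d.modify f.2.2 [] (· ++ [[f.1, f.2.1]]) else d) from by
    funext d f; by_cases h : PySem.Int.mod f.2.2 2 == 0 <;> simp [step_eq d f]]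
  rw [← List.foldl_filter]
  set evens := facts_sample.filter (fun f => PySem.Int.mod f.2.2 2 == 0) with hev
  rw [show (evens.foldl (fun d f => d.modify f.2.2 [] (· ++ [[f.1, f.2.1]])) PySem.Dict.empty)
      = ((evens.map (fun f => (f.2.2, [f.1, f.2.1]))).foldl
          (fun d p => d.modify p.1 [] (· ++ [p.2])) PySem.Dict.empty) from by
    rw [List.foldl_map]]
  rw [PySem.Dict.items_eq_map_keys _
    (PySem.Dict.nodup_keys_foldl_modify_key _ _ _ _ _ PySem.Dict.nodup_keys_empty) []]
  rw [PySem.Dict.keys_foldl_modify_key]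
  simp only [PySem.Dict.keys_empty, PySem.Set.update_nil_left, List.map_map]
  rw [show ((fun p : Int × List Int => p.1) ∘ (fun f : Int × Int × Int => (f.2.2, [f.1, f.2.1])))
      = (fun f : Int × Int × Int => f.2.2) from rfl]
  rw [← PySem.List.dedup_eq_ofList]
  apply List.map_congr_left
  intro k _
  rw [PySem.Dict.getD_foldl_modify_append, PySem.Dict.getD_empty, List.nil_append,
    List.filter_map, List.map_map]
  rfl

-- ===== VERDICT (by name: the statement is the Claim_ definition above) =====
theorem get_fact_dic_sample_spec : Claim_equal_get_fact_dic_sample := by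
  intro facts_sample isUncertian _
  show get_fact_dic_sample facts_sample isUncertian = get_fact_dic_sample_alt facts_sample isUncertian
  exact ports_agree facts_sample isUncertian
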